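-- pv_equiv track=rewrite | github.com/taoshen58/glm-codes | src_lm/data/dataset_line.py | _get_unused_idxs_and_lens
-- ===== SOURCE A (Python) =====
-- def _get_unused_idxs_and_lens(seq_len, token_idxs_list):
--     _used_set = set(_idx for _idxs in token_idxs_list for _idx in _idxs)
--     assert len(_used_set) == 0 or max(_used_set) < seq_len
--
--     tk_idx2len_dict = {}
--     idx_buffer = []
--     for _idx in range(seq_len + 1):  # for final one
--         if _idx in _used_set or _idx == seq_len:
--             if len(idx_buffer) > 0:
--                 for _j, _i in enumerate(idx_buffer):
--                     tk_idx2len_dict[_i] = len(idx_buffer) - _j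
--                 idx_buffer = []
--         else:
--             idx_buffer.append(_idx)
--     return tk_idx2len_dict  # {id==>max_span_len_available}
-- ===== SOURCE B (Python) =====
-- def _get_unused_idxs_and_lens(seq_len, token_idxs_list):
--     _used_set = set(_idx for _idxs in token_idxs_list for _idx in _idxs)
--     assert len(_used_set) == 0 or max(_used_set) < seq_len
--
--     # sort the used indices once, then emit each gap between consecutive
--     # boundaries directly: index i in a gap ending at b gets span b - i
--     boundaries = sorted(i for i in _used_set if 0 <= i) + [seq_len]
--     tk_idx2len_dict = {}
--     start = 0
--     for b in boundaries:
--         for i in range(start, b):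
--             tk_idx2len_dict[i] = b - i
--         start = b + 1
--     return tk_idx2len_dict
-- ===== Notes on version B (the rewrite author's own statement) =====
-- stated objective: alternative
-- what changed: Replaces the forward index-by-index sweep with a flush buffer by sorting the used indices once and emitting each gap between consecutive sorted boundaries directly, giving index i in a gap ending at b the span b - i; the Python assert is kept identical.
import Mathlib
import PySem

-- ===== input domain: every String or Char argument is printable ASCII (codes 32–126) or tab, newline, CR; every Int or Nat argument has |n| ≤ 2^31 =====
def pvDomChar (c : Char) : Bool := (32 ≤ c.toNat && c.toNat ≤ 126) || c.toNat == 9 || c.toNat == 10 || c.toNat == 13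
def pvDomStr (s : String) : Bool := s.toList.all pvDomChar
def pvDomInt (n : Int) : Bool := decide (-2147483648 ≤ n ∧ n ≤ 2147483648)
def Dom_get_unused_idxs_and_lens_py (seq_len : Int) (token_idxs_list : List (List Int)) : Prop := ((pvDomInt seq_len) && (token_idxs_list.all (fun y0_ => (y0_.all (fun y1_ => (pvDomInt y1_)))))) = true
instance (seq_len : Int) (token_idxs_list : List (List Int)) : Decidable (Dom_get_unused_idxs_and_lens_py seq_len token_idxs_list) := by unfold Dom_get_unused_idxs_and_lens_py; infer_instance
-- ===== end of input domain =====

-- B sorts the used indices once and emits each unused gap between consecutive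
-- boundaries directly (index i in a gap ending at b gets span b - i), instead of
-- A's forward sweep with a buffer flushed at every used index (objective: alternative).

-- ===== PORT A =====
-- literal port of A's forward buffer-and-flush loop; the Python assert's failing
-- inputs are excluded by Pre_ below.
def get_unused_idxs_and_lens_py (seq_len : Int) (token_idxs_list : List (List Int)) : List (Int × Int) :=
  let _used_set : PySem.Set Int := PySem.Set.ofList (token_idxs_list.flatMap (fun _idxs => _idxs))
  let st := (PySem.List.pyRange 0 (seq_len + 1) 1).foldl
    (fun (st : PySem.Dict Int Int × List Int) (_idx : Int) =>
      if PySem.Set.contains _used_set _idx || _idx == seq_len then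
        if 0 < st.2.length then
          ((PySem.List.enumerate st.2 0).foldl
             (fun d p => d.insert p.2 ((st.2.length : Int) - p.1)) st.1, [])
        else st
      else (st.1, st.2 ++ [_idx]))
    (PySem.Dict.empty, ([] : List Int))
  st.1.items

-- ===== PORT B =====
-- literal port of B (Source B): the inner 'for i in range(start, b)' gap loop …
def pvBgap (d : PySem.Dict Int Int) (start b : Int) : PySem.Dict Int Int :=
  (PySem.List.pyRange start b 1).foldl (fun d i => d.insert i (b - i)) d

-- … and the outer 'for b in boundaries' loop, recursing on the boundary list.
def pvBloop : PySem.Dict Int Int → Int → List Int → PySem.Dict Int Int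
  | d, _, [] => d
  | d, start, b :: rest => pvBloop (pvBgap d start b) (b + 1) rest

def get_unused_idxs_and_lens_py_alt (seq_len : Int) (token_idxs_list : List (List Int)) : List (Int × Int) :=
  let _used_set : PySem.Set Int := PySem.Set.ofList (token_idxs_list.flatMap (fun _idxs => _idxs))
  let boundaries :=
    PySem.List.sorted (_used_set.filter (fun i => decide (0 ≤ i))) (fun x => x) false ++ [seq_len]
  (pvBloop PySem.Dict.empty 0 boundaries).items

-- ===== PRECONDITION & SPEC =====
-- Pre_ excludes exactly the inputs on which A's (and B's identical) assert raises
-- AssertionError: some used index is ≥ seq_len.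
def Pre_get_unused_idxs_and_lens_py (seq_len : Int) (token_idxs_list : List (List Int)) : Prop :=
  ∀ x ∈ token_idxs_list.flatMap (fun _idxs => _idxs), x < seq_len
instance (seq_len : Int) (token_idxs_list : List (List Int)) : Decidable (Pre_get_unused_idxs_and_lens_py seq_len token_idxs_list) := by unfold Pre_get_unused_idxs_and_lens_py; infer_instance
def pvWitness_get_unused_idxs_and_lens_py : Int × List (List Int) := (6, [[1, 2], [4]])

def Spec_get_unused_idxs_and_lens_py (seq_len : Int) (token_idxs_list : List (List Int)) (out : List (Int × Int)) : Prop := out = get_unused_idxs_and_lens_py_alt seq_len token_idxs_list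
instance (seq_len : Int) (token_idxs_list : List (List Int)) (out : List (Int × Int)) : Decidable (Spec_get_unused_idxs_and_lens_py seq_len token_idxs_list out) := by unfold Spec_get_unused_idxs_and_lens_py; infer_instance

-- ===== CLAIM (what is proved, stated in full; the proofs are below) =====
def Claim_equal_get_unused_idxs_and_lens_py : Prop := ∀ (seq_len : Int) (token_idxs_list : List (List Int)), Dom_get_unused_idxs_and_lens_py seq_len token_idxs_list → Pre_get_unused_idxs_and_lens_py seq_len token_idxs_list → Spec_get_unused_idxs_and_lens_py seq_len token_idxs_list (get_unused_idxs_and_lens_py seq_len token_idxs_list)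

-- ===== LEMMAS AND PROOFS =====

-- run length of consecutive unused indices starting at i, capped at n
def pvRunlen (u : List Int) (n : Nat) (i : Nat) : Nat :=
  if _h : i < n then (if (i : Int) ∈ u then 0 else pvRunlen u n (i + 1) + 1) else 0
termination_by n - i

-- the common answer: ascending pairs (i, runlen i) for unused i < k
def pvSpec (u : List Int) (n k : Nat) : List (Int × Int) :=
  (List.range k).filterMap
    (fun (i : Nat) => if (i : Int) ∈ u then none else some ((i : Int), (pvRunlen u n i : Int)))

-- length of the trailing unused run of [0, k)
def pvTrail (u : List Int) : Nat → Nat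
  | 0 => 0
  | k + 1 => if (k : Int) ∈ u then 0 else pvTrail u k + 1

theorem pvRunlen_of_ge (u : List Int) {n i : Nat} (h : n ≤ i) : pvRunlen u n i = 0 := by
  unfold pvRunlen; rw [dif_neg (by omega)]

theorem pvRunlen_of_mem (u : List Int) {n i : Nat} (h : i < n)
    (hm : (i : Int) ∈ u) : pvRunlen u n i = 0 := by
  unfold pvRunlen; rw [dif_pos h, if_pos hm]

theorem pvRunlen_of_not_mem (u : List Int) {n i : Nat} (h : i < n)
    (hm : (i : Int) ∉ u) :
    pvRunlen u n i = pvRunlen u n (i + 1) + 1 := by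
  conv_lhs => unfold pvRunlen
  rw [dif_pos h, if_neg hm]

theorem pvRunlen_run (u : List Int) (n : Nat) :
    ∀ (d i : Nat), (∀ j < d, ((i + j : Nat) : Int) ∉ u) →
    i + d ≤ n → pvRunlen u n (i + d) = 0 → pvRunlen u n i = d := by
  intro d
  induction d with
  | zero => intro i _ _ hz; simpa using hz
  | succ d ih =>
      intro i hrun hle hz
      have h0 : (i : Int) ∉ u := by simpa using hrun 0 (by omega)
      rw [pvRunlen_of_not_mem u (by omega) h0]
      have := ih (i + 1) (fun j hj => by
          have := hrun (j + 1) (by omega)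
          have e : i + (j + 1) = i + 1 + j := by omega
          rwa [e] at this)
        (by omega) (by
          have e : i + 1 + d = i + (d + 1) := by omega
          rw [e]; exact hz)
      omega

theorem pvSpec_succ (u : List Int) (n k : Nat) :
    pvSpec u n (k + 1) = pvSpec u n k ++
      (if (k : Int) ∈ u then [] else [((k : Int), (pvRunlen u n k : Int))]) := by
  simp only [pvSpec, List.range_succ, List.filterMap_append, List.filterMap_cons, List.filterMap_nil]
  split <;> simp_all

theorem pvSpec_mem_lt (u : List Int) (n k : Nat) :
    ∀ p ∈ pvSpec u n k, p.1 < (k : Int) := by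
  intro p hp
  simp only [pvSpec, List.mem_filterMap, List.mem_range] at hp
  obtain ⟨i, hi, hmk⟩ := hp
  split at hmk
  · simp at hmk
  · cases hmk; simpa using hi

theorem pvSpec_append_run (u : List Int) (n : Nat) :
    ∀ (t a : Nat), (∀ j < t, ((a + j : Nat) : Int) ∉ u) →
    a + t ≤ n → pvRunlen u n (a + t) = 0 →
    pvSpec u n (a + t) = pvSpec u n a ++
      (List.range' a t).map (fun (i : Nat) => ((i : Int), (pvRunlen u n i : Int))) := by
  intro t
  induction t with
  | zero => intro a _ _ _; simp
  | succ t ih =>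
      intro a hrun hle hz
      have h0 : (a : Int) ∉ u := by simpa using hrun 0 (by omega)
      have hrec := ih (a + 1) (fun j hj => by
          have := hrun (j + 1) (by omega)
          have e : a + (j + 1) = a + 1 + j := by omega
          rwa [e] at this)
        (by omega) (by
          have e : a + 1 + t = a + (t + 1) := by omega
          rw [e]; exact hz)
      have hstep : pvSpec u n (a + 1) = pvSpec u n a ++ [((a : Int), (pvRunlen u n a : Int))] := by
        rw [pvSpec_succ, if_neg h0]
      have hidx : a + (t + 1) = (a + 1) + t := by omega
      rw [hidx, hrec, hstep, List.range'_succ]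
      simp

theorem pvTrail_le (u : List Int) : ∀ k, pvTrail u k ≤ k := by
  intro k
  induction k with
  | zero => simp [pvTrail]
  | succ k ih => unfold pvTrail; split <;> omega

theorem pvTrail_spec (u : List Int) :
    ∀ k j, k - pvTrail u k ≤ j → j < k → (j : Int) ∉ u := by
  intro k
  induction k with
  | zero => omega
  | succ k ih =>
      intro j h1 h2
      unfold pvTrail at h1
      by_cases hm : (k : Int) ∈ u
      · rw [if_pos hm] at h1; omega
      · rw [if_neg hm] at h1
        rcases Nat.lt_succ_iff_lt_or_eq.mp h2 with h | h
        · exact ih j (by have := pvTrail_le u k; omega) h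
        · subst h; exact hm

-- the flushed enumerate-loop appends exactly the missing segment of pvSpec
theorem pvFlush_items (u : List Int) (n c t : Nat)
    (hct : c + t ≤ n)
    (hrun : ∀ j, c ≤ j → j < c + t → (j : Int) ∉ u)
    (hz : pvRunlen u n (c + t) = 0) :
    ((PySem.List.enumerate ((List.range' c t).map (fun (j : Nat) => (j : Int))) 0).foldl
        (fun d p => d.insert p.2 (((((List.range' c t).map (fun (j : Nat) => (j : Int))).length : Nat) : Int) - p.1))
        (PySem.Dict.mk (pvSpec u n c))).items
      = pvSpec u n (c + t) := by
  have hbuf : ∀ (j : Nat) (hj : j < t),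
      ((List.range' c t).map (fun (j : Nat) => (j : Int)))[j]'(by simpa using hj) = ((c + j : Nat) : Int) := by
    intro j hj
    simp [List.getElem_range']
  have hfresh : ∀ p ∈ PySem.List.enumerate ((List.range' c t).map (fun (j : Nat) => (j : Int))) 0,
      (PySem.Dict.mk (pvSpec u n c)).contains p.2 = false := by
    intro p hp
    rw [PySem.List.mem_enumerate_iff] at hp
    obtain ⟨j, hj, rfl⟩ := hp
    rw [PySem.Dict.contains_mk]
    rw [List.any_eq_false]
    intro q hq
    have hlt := pvSpec_mem_lt u n c q hq
    have := hbuf j (by simpa using hj)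
    simp only [this]
    simp only [beq_iff_eq]
    intro hcontra
    rw [hcontra] at hlt
    push_cast at hlt
    omega
  have hnodup : (List.map (fun p => p.2) (PySem.List.enumerate ((List.range' c t).map (fun (j : Nat) => (j : Int))) 0)).Nodup := by
    rw [PySem.List.map_snd_enumerate]
    exact (List.nodup_range').map (fun a b h => by exact_mod_cast h)
  rw [PySem.Dict.items_foldl_insert_fresh _ _ _ _ hfresh hnodup]
  have hmapeq : List.map (fun p => (p.2, (((((List.range' c t).map (fun (j : Nat) => (j : Int))).length : Nat) : Int)) - p.1))
        (PySem.List.enumerate ((List.range' c t).map (fun (j : Nat) => (j : Int))) 0)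
      = (List.range' c t).map (fun (i : Nat) => ((i : Int), (pvRunlen u n i : Int))) := by
    apply List.ext_getElem
    · simp [PySem.List.length_enumerate]
    · intro j h1 h2
      have hj : j < t := by
        simpa [PySem.List.length_enumerate] using h1
      rw [List.getElem_map, List.getElem_map, PySem.List.getElem_enumerate]
      have hb := hbuf j hj
      simp only [hb]
      have hrl : pvRunlen u n (c + j) = t - j := by
        apply pvRunlen_run u n (t - j) (c + j)
        · intro j' hj'
          apply hrun <;> omega
        · omega
        · have e : c + j + (t - j) = c + t := by omega
          rw [e]; exact hz
      rw [List.getElem_range']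
      simp only [one_mul, hrl]
      rw [Prod.ext_iff]
      refine ⟨rfl, ?_⟩
      simp only [List.length_map, List.length_range']
      push_cast [Nat.cast_sub (by omega : j ≤ t)]
      ring
  rw [hmapeq]
  rw [pvSpec_append_run u n t c (fun j hj => hrun (c + j) (by omega) (by omega)) hct hz]

-- A's forward fold invariant
theorem pvA_inv (u : List Int) (nI : Int) (n : Nat) (hn : nI = (n : Int)) :
    ∀ k, k ≤ n →
    ((PySem.List.pyRange 0 (k : Int) 1).foldl
        (fun (st : PySem.Dict Int Int × List Int) (_idx : Int) =>
          if PySem.Set.contains u _idx || _idx == nI then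
            if 0 < st.2.length then
              ((PySem.List.enumerate st.2 0).foldl
                 (fun d p => d.insert p.2 ((st.2.length : Int) - p.1)) st.1, [])
            else st
          else (st.1, st.2 ++ [_idx]))
        (PySem.Dict.empty, ([] : List Int)))
      = (PySem.Dict.mk (pvSpec u n (k - pvTrail u k)),
         (List.range' (k - pvTrail u k) (pvTrail u k)).map (fun (j : Nat) => (j : Int))) := by
  intro k
  induction k with
  | zero =>
      intro _
      rw [PySem.List.pyRange_one_eq_nil (by omega)]
      simp [pvTrail, pvSpec]
      rfl
  | succ k ih =>
      intro hk1
      have hk : k ≤ n := by omega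
      have hkn : k < n := by omega
      have hsplit : PySem.List.pyRange 0 ((k + 1 : Nat) : Int) 1
          = PySem.List.pyRange 0 (k : Int) 1 ++ [(k : Int)] := by
        have h1 : ((k + 1 : Nat) : Int) = (k : Int) + 1 := by push_cast; ring
        rw [h1, PySem.List.pyRange_one_succ_right (by omega)]
      rw [hsplit, List.foldl_append, ih hk, List.foldl_cons, List.foldl_nil]
      have hT := pvTrail_le u k
      by_cases hm : (k : Int) ∈ u
      · have hcond : (PySem.Set.contains u (k : Int) || ((k : Int) == nI)) = true := by
          simp [hm]
        rw [if_pos hcond]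
        have htr1 : pvTrail u (k + 1) = 0 := by unfold pvTrail; rw [if_pos hm]
        have hspec1 : pvSpec u n (k + 1) = pvSpec u n k := by
          rw [pvSpec_succ, if_pos hm, List.append_nil]
        rcases Nat.eq_zero_or_pos (pvTrail u k) with h0 | hpos
        · rw [if_neg (by simp [h0])]
          rw [htr1, h0]
          simp only [Nat.sub_zero]
          rw [hspec1]
          simp
        · rw [if_pos (by simp; omega)]
          have hflush := pvFlush_items u n (k - pvTrail u k) (pvTrail u k)
            (by omega)
            (fun j hj1 hj2 => pvTrail_spec u k j hj1 (by omega))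
            (by
              have e : k - pvTrail u k + pvTrail u k = k := by omega
              rw [e]
              exact pvRunlen_of_mem u hkn hm)
          rw [Prod.ext_iff]
          constructor
          · apply PySem.Dict.ext
            simp only []
            rw [hflush]
            have e : k - pvTrail u k + pvTrail u k = k := by omega
            rw [e, htr1]
            simp only [Nat.sub_zero]
            rw [hspec1]
          · simp [htr1]
      · rw [if_neg (by
          simp only [Bool.or_eq_true, not_or]
          constructor
          · simp [hm]
          · simp only [beq_iff_eq, hn]
            exact_mod_cast Nat.ne_of_lt hkn)]
        have htr1 : pvTrail u (k + 1) = pvTrail u k + 1 := by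
          simp only [pvTrail]; rw [if_neg hm]
        have hc : k + 1 - pvTrail u (k + 1) = k - pvTrail u k := by rw [htr1]; omega
        rw [Prod.ext_iff]
        constructor
        · simp only []
          rw [hc]
        · simp only []
          rw [hc, htr1, List.range'_concat, List.map_append]
          have e : k - pvTrail u k + 1 * pvTrail u k = k := by omega
          rw [e]
          simp

-- B's gap loop turns pvSpec at 'start' into pvSpec at the boundary b
theorem pvBgap_spec (u : List Int) (n : Nat) (start m : Nat)
    (hsm : start ≤ m) (hmn : m ≤ n)
    (hgap : ∀ j : Nat, start ≤ j → j < m → (j : Int) ∉ u)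
    (hz : pvRunlen u n m = 0) :
    pvBgap (PySem.Dict.mk (pvSpec u n start)) (start : Int) (m : Int)
      = PySem.Dict.mk (pvSpec u n m) := by
  apply PySem.Dict.ext
  unfold pvBgap
  have hfresh : ∀ a ∈ PySem.List.pyRange (start : Int) (m : Int) 1,
      (PySem.Dict.mk (pvSpec u n start)).contains a = false := by
    intro a ha
    rw [PySem.List.mem_pyRange_one] at ha
    rw [PySem.Dict.contains_mk, List.any_eq_false]
    intro q hq
    have hlt := pvSpec_mem_lt u n start q hq
    simp only [beq_iff_eq]
    omega
  have hnodup : ((PySem.List.pyRange (start : Int) (m : Int) 1).map (fun i => i)).Nodup := by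
    simpa using PySem.List.nodup_pyRange_one (a := (start : Int)) (b := (m : Int))
  have := PySem.Dict.items_foldl_insert_fresh (PySem.List.pyRange (start : Int) (m : Int) 1)
      (fun i => i) (fun i => (m : Int) - i) (PySem.Dict.mk (pvSpec u n start)) hfresh hnodup
  simp only [] at this
  rw [this]
  have hmap : (PySem.List.pyRange (start : Int) (m : Int) 1).map (fun i => (i, (m : Int) - i))
      = (List.range' start (m - start)).map (fun (i : Nat) => ((i : Int), (pvRunlen u n i : Int))) := by
    apply List.ext_getElem
    · simp only [List.length_map, PySem.List.length_pyRange_one, List.length_range']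
      omega
    · intro j h1 h2
      have hj : j < m - start := by simpa using h2
      rw [List.getElem_map, List.getElem_map, PySem.List.getElem_pyRange_one, List.getElem_range']
      have hrl : pvRunlen u n (start + j) = m - (start + j) := by
        apply pvRunlen_run u n (m - (start + j)) (start + j)
        · intro j' hj'
          apply hgap <;> omega
        · omega
        · have e : start + j + (m - (start + j)) = m := by omega
          rw [e]; exact hz
      simp only [one_mul, hrl]
      rw [Prod.ext_iff]
      constructor
      · push_cast; ring
      · push_cast [Nat.cast_sub (by omega : start + j ≤ m)]
        ring
  rw [hmap]
  have := pvSpec_append_run u n (m - start) start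
    (fun j hj => hgap (start + j) (by omega) (by omega))
    (by omega)
    (by have e : start + (m - start) = m := by omega
        rw [e]; exact hz)
  have e : start + (m - start) = m := by omega
  rw [e] at this
  exact this.symm

-- B's outer loop over a sound boundary list reaches pvSpec at n
theorem pvBloop_spec (u : List Int) (n : Nat) :
    ∀ (bs : List Int) (start : Nat), start ≤ n →
    bs.Pairwise (· < ·) →
    (∀ b ∈ bs, (start : Int) ≤ b ∧ b ≤ (n : Int)) →
    ((n : Int) ∈ bs) →
    (∀ b ∈ bs, b = (n : Int) ∨ b ∈ u) →
    (∀ j : Nat, start ≤ j → j < n → (j : Int) ∈ u → (j : Int) ∈ bs) →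
    pvBloop (PySem.Dict.mk (pvSpec u n start)) (start : Int) bs
      = PySem.Dict.mk (pvSpec u n n) := by
  intro bs
  induction bs with
  | nil => intro start _ _ _ hn _ _; simp at hn
  | cons b rest ih =>
      intro start hsn hpw hbd hn hmem hcov
      obtain ⟨hsb, hbn⟩ := hbd b (by simp)
      obtain ⟨m, rfl⟩ : ∃ m : Nat, b = (m : Int) :=
        ⟨b.toNat, (Int.toNat_of_nonneg (by omega)).symm⟩
      have hsm : start ≤ m := by exact_mod_cast hsb
      have hmn : m ≤ n := by exact_mod_cast hbn
      have hrest_gt : ∀ c ∈ rest, (m : Int) < c := by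
        intro c hc; exact (List.pairwise_cons.mp hpw).1 c hc
      have hgap : ∀ j : Nat, start ≤ j → j < m → (j : Int) ∉ u := by
        intro j hj1 hj2 hju
        have hjn : j < n := by omega
        have := hcov j hj1 hjn hju
        rcases List.mem_cons.mp this with h | h
        · have : (j : Int) = (m : Int) := by simpa using h
          omega
        · have := hrest_gt _ h
          omega
      have hz : pvRunlen u n m = 0 := by
        by_cases hmeq : m = n
        · subst hmeq; exact pvRunlen_of_ge u le_rfl
        · have hmlt : m < n := by omega
          rcases hmem (m : Int) (by simp) with h | h
          · exfalso; have : m = n := by exact_mod_cast h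
            omega
          · exact pvRunlen_of_mem u hmlt h
      rw [pvBloop, pvBgap_spec u n start m hsm hmn hgap hz]
      by_cases hmeq : m = n
      · subst hmeq
        have hrest_nil : rest = [] := by
          cases rest with
          | nil => rfl
          | cons c cs =>
              exfalso
              have h1 := hrest_gt c (by simp)
              have h2 := (hbd c (by simp)).2
              omega
        rw [hrest_nil, pvBloop]
      · have hmlt : m < n := by omega
        have hmu : (m : Int) ∈ u := by
          rcases hmem (m : Int) (by simp) with h | h
          · exfalso; have : m = n := by exact_mod_cast h
            omega
          · exact h
        have hspec1 : pvSpec u n (m + 1) = pvSpec u n m := by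
          rw [pvSpec_succ, if_pos hmu, List.append_nil]
        have hcast : (m : Int) + 1 = ((m + 1 : Nat) : Int) := by push_cast; ring
        rw [← hspec1, hcast]
        apply ih (m + 1) (by omega) (List.pairwise_cons.mp hpw).2
        · intro c hc
          refine ⟨?_, (hbd c (by simp [hc])).2⟩
          have := hrest_gt c hc
          push_cast
          omega
        · rcases List.mem_cons.mp hn with h | h
          · exfalso
            have : n = m := by exact_mod_cast h
            omega
          · exact h
        · intro c hc; exact hmem c (by simp [hc])
        · intro j hj1 hj2 hju
          have := hcov j (by omega) hj2 hju
          rcases List.mem_cons.mp this with h | h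
          · exfalso
            have : j = m := by exact_mod_cast h
            omega
          · exact h

-- the two ports agree on every input satisfying Pre_
theorem pvPorts_eq (seq_len : Int) (token_idxs_list : List (List Int))
    (hpre : Pre_get_unused_idxs_and_lens_py seq_len token_idxs_list) :
    get_unused_idxs_and_lens_py seq_len token_idxs_list
      = get_unused_idxs_and_lens_py_alt seq_len token_idxs_list := by
  simp only [get_unused_idxs_and_lens_py, get_unused_idxs_and_lens_py_alt]
  have hpre' : ∀ x ∈ PySem.Set.ofList (token_idxs_list.flatMap (fun _idxs => _idxs)), x < seq_len := by
    intro x hx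
    exact hpre x ((PySem.Set.mem_ofList _ _).mp hx)
  by_cases hneg : seq_len < 0
  · -- empty range on both sides
    rw [PySem.List.pyRange_one_eq_nil (by omega)]
    have hfilter : (PySem.Set.ofList (token_idxs_list.flatMap (fun _idxs => _idxs))).filter
        (fun i => decide (0 ≤ i)) = [] := by
      rw [List.filter_eq_nil_iff]
      intro x hx
      have := hpre' x hx
      simp only [decide_eq_true_eq]
      omega
    rw [hfilter]
    have hsortnil : PySem.List.sorted ([] : List Int) (fun x => x) false = [] := by
      rw [PySem.List.sorted_eq_nil_iff]
    rw [hsortnil]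
    simp only [List.nil_append, List.foldl_nil, pvBloop, pvBgap]
    rw [PySem.List.pyRange_one_eq_nil (by omega)]
    simp
  · obtain ⟨n, rfl⟩ : ∃ n : Nat, seq_len = (n : Int) :=
      ⟨seq_len.toNat, (Int.toNat_of_nonneg (by omega)).symm⟩
    set u := PySem.Set.ofList (token_idxs_list.flatMap (fun _idxs => _idxs)) with hu
    have hund : u.Nodup := PySem.Set.nodup_ofList _
    have hz : pvRunlen u n n = 0 := pvRunlen_of_ge _ le_rfl
    -- A side reaches pvSpec u n n
    have hAside : ((PySem.List.pyRange 0 ((n : Int) + 1) 1).foldl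
        (fun (st : PySem.Dict Int Int × List Int) (_idx : Int) =>
          if PySem.Set.contains u _idx || _idx == (n : Int) then
            if 0 < st.2.length then
              ((PySem.List.enumerate st.2 0).foldl
                 (fun d p => d.insert p.2 ((st.2.length : Int) - p.1)) st.1, [])
            else st
          else (st.1, st.2 ++ [_idx]))
        (PySem.Dict.empty, ([] : List Int))).1.items = pvSpec u n n := by
      rw [PySem.List.pyRange_one_succ_right (by omega), List.foldl_append,
        pvA_inv u (n : Int) n rfl n le_rfl, List.foldl_cons, List.foldl_nil]
      rw [if_pos (by simp)]
      have hT := pvTrail_le u n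
      rcases Nat.eq_zero_or_pos (pvTrail u n) with h0 | hpos
      · rw [if_neg (by rw [List.length_map, List.length_range']; omega)]
        rw [h0, Nat.sub_zero]
      · rw [if_pos (by rw [List.length_map, List.length_range']; omega)]
        have hflush := pvFlush_items u n (n - pvTrail u n) (pvTrail u n)
          (by omega)
          (fun j hj1 hj2 => pvTrail_spec u n j hj1 (by omega))
          (by
            have e : n - pvTrail u n + pvTrail u n = n := by omega
            rw [e]; exact hz)
        simp only []
        rw [hflush]
        have e : n - pvTrail u n + pvTrail u n = n := by omega
        rw [e]
    rw [hAside]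
    -- B side: the boundary list is sound, so pvBloop reaches pvSpec u n n too
    set s := PySem.List.sorted (u.filter (fun i => decide (0 ≤ i))) (fun x => x) false with hs
    have hperm : s.Perm (u.filter (fun i => decide (0 ≤ i))) := PySem.List.sorted_perm _ _ _
    have hmem_s : ∀ x, x ∈ s ↔ (x ∈ u ∧ 0 ≤ x) := by
      intro x
      rw [hs, PySem.List.mem_sorted, List.mem_filter]
      simp
    have hs_nodup : s.Nodup := hperm.nodup_iff.mpr (hund.filter _)
    have hs_le : s.Pairwise (fun a b => (fun x => x) a ≤ (fun x => x) b) :=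
      PySem.List.sorted_pairwise _ _
    have hs_lt : s.Pairwise (· < ·) := by
      have := hs_le.and hs_nodup
      exact this.imp (fun ⟨hle, hne⟩ => lt_of_le_of_ne hle hne)
    have hs_bd : ∀ b ∈ s, (0 : Int) ≤ b ∧ b < (n : Int) := by
      intro b hb
      obtain ⟨hbu, hb0⟩ := (hmem_s b).mp hb
      exact ⟨hb0, hpre' b hbu⟩
    have hloop := pvBloop_spec u n (s ++ [(n : Int)]) 0 (by omega)
      (by
        rw [List.pairwise_append]
        refine ⟨hs_lt, by simp, ?_⟩
        intro x hx y hy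
        simp only [List.mem_singleton] at hy
        subst hy
        exact (hs_bd x hx).2)
      (by
        intro b hb
        rcases List.mem_append.mp hb with h | h
        · have := hs_bd b h
          exact ⟨by simpa using this.1, by omega⟩
        · simp only [List.mem_singleton] at h
          subst h
          exact ⟨by simp, le_rfl⟩)
      (by simp)
      (by
        intro b hb
        rcases List.mem_append.mp hb with h | h
        · exact Or.inr ((hmem_s b).mp h).1
        · simp only [List.mem_singleton] at h
          exact Or.inl h)
      (by
        intro j _ _ hju
        exact List.mem_append.mpr (Or.inl ((hmem_s (j : Int)).mpr ⟨hju, by positivity⟩)))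
    have hstart : pvSpec u n 0 = [] := by simp [pvSpec]
    have hempty : PySem.Dict.empty = PySem.Dict.mk (pvSpec u n 0) := by
      rw [hstart]; rfl
    rw [hempty]
    have h0 : ((0 : Nat) : Int) = (0 : Int) := rfl
    rw [← h0, hloop]

-- ===== VERDICT (by name: the statement is the Claim_ definition above) =====
theorem get_unused_idxs_and_lens_py_spec : Claim_equal_get_unused_idxs_and_lens_py := by
  intro seq_len token_idxs_list _dom hpre
  unfold Spec_get_unused_idxs_and_lens_py
  exact pvPorts_eq seq_len token_idxs_list hpre
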